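-- pv_equiv track=rewrite | github.com/junu-kk/coding-test | 이코테/1 - 그리디/기출문제/무지의 먹방 라이브/greedy_solution.py | solution
-- ===== SOURCE A (Python) =====
-- from heapq import heappush, heappop
--
-- def solution(foods, k):
--     food_n = len(foods)
--     if sum(foods) <= k:
--         return -1
--
--     q = []
--     for i in range(food_n):
--         heappush(q, (foods[i], i + 1))  # (음식양, 음식번호)
--
--     '''
--     전략
--     1. 제일 작은 음식을 다 먹는다. 근데 그거 다 먹기 위해서 다른 것도 몇입씩 떼어 먹어야 한다.
--     2. 그 다음 작은 음식을 다 먹기 위해선, (그 음식의 사이즈 - 아까 뜯어먹은 양)을 또 먹어야겠지? 이것 또한 그만큼 먹으며 다른 음식들도 그만큼 떼어먹는다.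
--     3. 반복한다.
--     '''
--
--     time_elapsed = 0  # 먹기 위해 사용한 총 시간
--     prev_food_size = 0  # 반복문 보면 이게 어떻게 쓰이는지 알거임.
--
--     # 가장 작은 음식을 다 먹을만큼 다른 음식에도 시간을 쓰는 것이 가능할 경우
--     while time_elapsed + ((q[0][0]-prev_food_size)*food_n) <= k:
--         food_size, i = heappop(q)  # 먹을준비
--         time_elapsed += (food_size - prev_food_size) * food_n  # 쳐묵
--         food_n -= 1  # 쳐묵완료
--         prev_food_size = food_size  # 떼어먹은 만큼을 저장.
--
--     # q는 힙이었지만 이제부턴 리스트다. 음식번호순으로 (남아있는) 음식 정렬 후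
--     result = sorted(q, key=lambda x: x[1])
--     # 다 먹은거 제하고, 남은 시간 계산해서 순서가 찾아온 음식 리턴.
--     return result[(k-time_elapsed) % food_n][1]
-- ===== SOURCE B (Python) =====
-- def solution(foods, k):
--     if sum(foods) <= k:
--         return -1
--     # Binary search for the largest level v such that eating every food down to
--     # at most v takes time <= k; no heap, no sort, no sequential simulation.
--     def eaten(v):
--         return sum(min(f, v) for f in foods)
--     lo = min(min(foods), k, 0)   # eaten(lo) = lo*len(foods) <= k
--     hi = max(foods)              # eaten(hi) = sum(foods) > k
--     while hi - lo > 1: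
--         mid = (lo + hi) // 2
--         if eaten(mid) <= k:
--             lo = mid
--         else:
--             hi = mid
--     v = lo
--     remaining = [i + 1 for i, f in enumerate(foods) if f > v]
--     return remaining[(k - eaten(v)) % len(remaining)]
-- ===== Notes on version B (the rewrite author's own statement) =====
-- stated objective: alternative
-- what changed: Replaces the greedy heap simulation (heappush/heappop loop eating foods in ascending size order) by a parametric binary search on the eaten level v: find the largest v with sum(min(f,v)) <= k, then the remaining foods are exactly those with f > v taken in original index order, no heap and no sort at all.
import Mathlib
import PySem

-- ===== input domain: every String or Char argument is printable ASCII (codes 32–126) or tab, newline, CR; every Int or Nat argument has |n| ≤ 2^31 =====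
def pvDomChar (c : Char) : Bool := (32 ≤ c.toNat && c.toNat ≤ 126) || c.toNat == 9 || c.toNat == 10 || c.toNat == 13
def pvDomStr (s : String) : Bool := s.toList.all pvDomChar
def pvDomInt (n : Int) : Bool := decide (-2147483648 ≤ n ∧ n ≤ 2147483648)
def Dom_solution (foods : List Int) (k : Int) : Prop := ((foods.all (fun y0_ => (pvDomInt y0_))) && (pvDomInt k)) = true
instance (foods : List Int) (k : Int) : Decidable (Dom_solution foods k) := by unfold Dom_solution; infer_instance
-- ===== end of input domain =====

-- B replaces A's greedy heap simulation by a binary search on the eaten level v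
-- (largest v with sum(min(f, v)) <= k); no heap, no sort (objective: alternative).
-- Return value only; neither version mutates its input.

-- ===== PORT A =====

-- Python tuple comparison (a, b) < (c, d) for int pairs (lexicographic), as heapq uses it
def pyLt (a b : Int × Int) : Bool := a.1 < b.1 || (a.1 == b.1 && a.2 < b.2)

def d0 : Int × Int := (0, 0)

-- CPython heapq._siftdown(heap, startpos, pos): a while loop that moves pos up towards
-- startpos; newitem = heap[pos] is threaded explicitly and the fuel argument (pos at the
-- call site) bounds the iteration count — each step strictly decreases pos, so the fuel
-- is never exhausted and the loop body is a faithful transliteration.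
def siftdownGo (startpos : Nat) (newitem : Int × Int) :
    Nat → List (Int × Int) → Nat → List (Int × Int)
  | 0, heap, pos => heap.set pos newitem
  | fuel + 1, heap, pos =>
    if startpos < pos then
      let parentpos := (pos - 1) / 2
      let parent := heap.getD parentpos d0
      if pyLt newitem parent then siftdownGo startpos newitem fuel (heap.set pos parent) parentpos
      else heap.set pos newitem
    else heap.set pos newitem

def siftdownLoop (heap : List (Int × Int)) (startpos pos : Nat) (newitem : Int × Int) :
    List (Int × Int) :=
  siftdownGo startpos newitem pos heap pos

-- CPython heapq._siftup(heap, pos) with startpos = 0 (the only call site, from heappop);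
-- newitem = heap[pos] is threaded explicitly; the final heap[pos] = newitem; _siftdown(...)
-- is the no-child branch.  The recursion is on the travelling position, which strictly
-- increases below the (preserved) length of the heap.
def siftupLoop (heap : List (Int × Int)) (pos : Nat) (newitem : Int × Int) :
    List (Int × Int) :=
  let endpos := heap.length
  let childpos := 2 * pos + 1
  if h : childpos < endpos then
    let rightpos := childpos + 1
    let cp := if rightpos < endpos && !(pyLt (heap.getD childpos d0) (heap.getD rightpos d0))
              then rightpos else childpos
    siftupLoop (heap.set pos (heap.getD cp d0)) cp newitem
  else
    siftdownLoop (heap.set pos newitem) 0 pos newitem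
termination_by heap.length - pos
decreasing_by
  simp only [List.length_set]
  split <;> omega

def heappush (heap : List (Int × Int)) (item : Int × Int) : List (Int × Int) :=
  siftdownLoop (heap ++ [item]) 0 heap.length item

-- heapq.heappop; none = IndexError on an empty heap
def heappop (heap : List (Int × Int)) : Option ((Int × Int) × List (Int × Int)) :=
  match heap.getLast? with
  | none => none
  | some lastelt =>
    let rest := heap.dropLast
    if rest.isEmpty then some (lastelt, rest)
    else some (rest.getD 0 d0, siftupLoop (rest.set 0 lastelt) 0 lastelt)

-- the while loop of A; q = [] means Python's q[0] raises IndexError (excluded by Pre_).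
-- The fuel (q's length at the call site) bounds the iteration count: each heappop removes
-- one element, so the fuel is never exhausted.
def solutionGo (k : Int) : Nat → List (Int × Int) → Int → Int → Int → Int
  | _, [], _, _, _ => 0
  | 0, _ :: _, _, _, _ => 0
  | fuel + 1, h0 :: rest, food_n, time_elapsed, prev_food_size =>
    if time_elapsed + (h0.1 - prev_food_size) * food_n ≤ k then
      match heappop (h0 :: rest) with
      | some (item, q') =>
        solutionGo k fuel q' (food_n - 1) (time_elapsed + (item.1 - prev_food_size) * food_n)
          item.1
      | none => 0
    else
      let result := PySem.List.sorted (h0 :: rest) (fun x => x.2) false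
      match PySem.Int.mod? (k - time_elapsed) food_n with
      | none => 0
      | some r =>
        match PySem.List.pyGet? result r with
        | none => 0
        | some x => x.2

def solutionLoop (q : List (Int × Int)) (food_n time_elapsed prev_food_size k : Int) : Int :=
  solutionGo k q.length q food_n time_elapsed prev_food_size

def solution (foods : List Int) (k : Int) : Int :=
  if foods.sum ≤ k then -1
  else
    let q := (PySem.List.pyRange 0 (foods.length : Int) 1).foldl
      (fun q i => heappush q (PySem.List.pyGetD foods i 0, i + 1)) []
    solutionLoop q (foods.length : Int) 0 0 k

-- ===== PORT B =====

-- eaten(v) = sum(min(f, v) for f in foods)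
def eatenAmt (foods : List Int) (v : Int) : Int :=
  foods.foldl (fun s f => s + min f v) 0

-- the while loop of B's binary search; the fuel ((hi - lo).toNat at the call site)
-- bounds the iteration count: hi - lo shrinks every iteration
def bsGo (foods : List Int) (k : Int) : Nat → Int → Int → Int
  | 0, lo, _ => lo
  | fuel + 1, lo, hi =>
    if 1 < hi - lo then
      let mid := PySem.Int.floordiv (lo + hi) 2
      if eatenAmt foods mid ≤ k then bsGo foods k fuel mid hi
      else bsGo foods k fuel lo mid
    else lo

def solution_alt (foods : List Int) (k : Int) : Int :=
  if foods.sum ≤ k then -1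
  else
    -- min(foods) / max(foods); none = ValueError on [], excluded by Pre_
    match PySem.List.min? foods (fun x => x), PySem.List.max? foods (fun x => x) with
    | some mn, some mx =>
      let lo := min (min mn k) 0
      let hi := mx
      let v := bsGo foods k (hi - lo).toNat lo hi
      let remaining := ((PySem.List.enumerate foods).filter
          (fun p => decide (v < p.2))).map (fun p => p.1 + 1)
      match PySem.Int.mod? (k - eatenAmt foods v) (remaining.length : Int) with
      | none => 0
      | some r =>
        match PySem.List.pyGet? remaining r with
        | none => 0
        | some x => x
    | _, _ => 0

-- ===== PRECONDITION & SPEC =====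
-- Pre_ excludes only foods = [] with k < 0, where Python A raises IndexError (q[0] on
-- the empty heap) and Python B raises ValueError (min of an empty list).
def Pre_solution (foods : List Int) (k : Int) : Prop := foods = [] → 0 ≤ k
instance (foods : List Int) (k : Int) : Decidable (Pre_solution foods k) := by
  unfold Pre_solution; infer_instance

def pvWitness_solution : List Int × Int := ([3, 1, 2], 5)

def Spec_solution (foods : List Int) (k : Int) (out : Int) : Prop := out = solution_alt foods k
instance (foods : List Int) (k : Int) (out : Int) : Decidable (Spec_solution foods k out) := by
  unfold Spec_solution; infer_instance

-- ===== CLAIM (what is proved, stated in full; the proofs are below) =====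
def Claim_equal_solution : Prop := ∀ (foods : List Int) (k : Int), Dom_solution foods k →
  Pre_solution foods k → Spec_solution foods k (solution foods k)

-- ===== LEMMAS AND PROOFS =====

-- ---- generic facts about the pair order, getD/set and small permutations ----

theorem pyLt_asymm {a b : Int × Int} (h : pyLt a b = true) : pyLt b a = false := by
  obtain ⟨a1, a2⟩ := a; obtain ⟨b1, b2⟩ := b
  simp only [pyLt, Bool.or_eq_true, Bool.and_eq_true, decide_eq_true_eq, beq_iff_eq,
    Bool.or_eq_false_iff, Bool.and_eq_false_iff, decide_eq_false_iff_not, beq_eq_false_iff_ne] at *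
  omega

theorem pyLt_irrefl (a : Int × Int) : pyLt a a = false := by
  obtain ⟨a1, a2⟩ := a
  simp [pyLt]

theorem pyLt_ff_trans {a b c : Int × Int} (h1 : pyLt a b = false) (h2 : pyLt b c = false) :
    pyLt a c = false := by
  obtain ⟨a1, a2⟩ := a; obtain ⟨b1, b2⟩ := b; obtain ⟨c1, c2⟩ := c
  simp only [pyLt, Bool.or_eq_false_iff, Bool.and_eq_false_iff, decide_eq_false_iff_not,
    beq_eq_false_iff_ne] at *
  omega

theorem pyLt_ff_tt {x p y : Int × Int} (h1 : pyLt x p = false) (h2 : pyLt y p = true) :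
    pyLt x y = false := by
  obtain ⟨a1, a2⟩ := x; obtain ⟨b1, b2⟩ := p; obtain ⟨c1, c2⟩ := y
  simp only [pyLt, Bool.or_eq_true, Bool.and_eq_true, decide_eq_true_eq, beq_iff_eq,
    Bool.or_eq_false_iff, Bool.and_eq_false_iff, decide_eq_false_iff_not, beq_eq_false_iff_ne] at *
  omega

theorem getD_set_self {α : Type} {l : List α} {i : Nat} (h : i < l.length) (v d : α) :
    (l.set i v).getD i d = v := by
  simp [List.getD, h]

theorem getD_set_ne {α : Type} {l : List α} {i j : Nat} (h : i ≠ j) (v d : α) :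
    (l.set i v).getD j d = l.getD j d := by
  simp [List.getD, List.getElem?_set, h]

theorem cons_set_perm {α : Type} : ∀ (t : List α) (j : Nat), j < t.length → ∀ (v d : α),
    (t.getD j d :: t.set j v).Perm (v :: t) := by
  intro t
  induction t with
  | nil => intro j hj; simp at hj
  | cons a t ih =>
    intro j hj v d
    cases j with
    | zero => simpa using List.Perm.swap v a t
    | succ j =>
      have h1 : ((a :: t).getD (j+1) d :: (a :: t).set (j+1) v) =
          (t.getD j d :: a :: t.set j v) := by simp [List.getD]
      rw [h1]
      exact ((List.Perm.swap a (t.getD j d) _).trans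
        (List.Perm.cons a (ih j (by simpa using hj) v d))).trans (List.Perm.swap v a t)

theorem cons_set_swap_perm {α : Type} : ∀ (t : List α) (i : Nat), i < t.length → ∀ (x y : α),
    (x :: t.set i y).Perm (y :: t.set i x) := by
  intro t
  induction t with
  | nil => intro i hi; simp at hi
  | cons a t ih =>
    intro i hi x y
    cases i with
    | zero => simpa using List.Perm.swap y x t
    | succ i =>
      simp only [List.set_cons_succ]
      exact ((List.Perm.swap a x _).trans
        (List.Perm.cons a (ih i (by simpa using hi) x y))).trans (List.Perm.swap y a _)

theorem perm_set_swap {α : Type} : ∀ (l : List α) (i j : Nat), i ≠ j → i < l.length →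
    j < l.length → ∀ (v d : α), ((l.set i (l.getD j d)).set j v).Perm (l.set i v) := by
  intro l
  induction l with
  | nil => intro i j _ hi; simp at hi
  | cons a t ih =>
    intro i j hij hi hj v d
    cases i with
    | zero =>
      cases j with
      | zero => exact absurd rfl hij
      | succ j =>
        simp only [List.set_cons_zero, List.set_cons_succ, List.getD_cons_succ]
        exact cons_set_perm t j (by simpa using hj) v d
    | succ i =>
      cases j with
      | zero =>
        simp only [List.set_cons_zero, List.set_cons_succ, List.getD_cons_zero]
        exact cons_set_swap_perm t i (by simpa using hi) v a
      | succ j =>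
        simp only [List.set_cons_succ, List.getD_cons_succ]
        exact List.Perm.cons a (ih i j (by omega) (by simpa using hi) (by simpa using hj) v d)

-- ---- the binary-heap invariant and the correctness of A's sift operations ----

def IsHeap (l : List (Int × Int)) : Prop :=
  ∀ i, 0 < i → i < l.length → pyLt (l.getD i d0) (l.getD ((i - 1) / 2) d0) = false

theorem root_min {l : List (Int × Int)} (hl : IsHeap l) :
    ∀ i, i < l.length → pyLt (l.getD i d0) (l.getD 0 d0) = false := by
  intro i
  induction i using Nat.strong_induction_on with
  | _ i ih =>
    intro hi
    rcases Nat.eq_zero_or_pos i with h0 | h0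
    · subst h0; exact pyLt_irrefl _
    · exact pyLt_ff_trans (hl i h0 hi) (ih ((i - 1) / 2) (by omega) (by omega))

theorem root_min_mem {l : List (Int × Int)} (hl : IsHeap l) {y : Int × Int} (hy : y ∈ l) :
    pyLt y (l.getD 0 d0) = false := by
  obtain ⟨i, hi, rfl⟩ := List.mem_iff_getElem.mp hy
  have : l.getD i d0 = l[i] := by simp [List.getD, List.getElem?_eq_getElem hi]
  rw [← this]
  exact root_min hl i hi

-- heap-but-for-the-bubbling-up-hole invariant of _siftdown
def heapExceptUp (heap : List (Int × Int)) (pos : Nat) (newitem : Int × Int) : Prop :=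
  (∀ i, 0 < i → i < heap.length → i ≠ pos →
      pyLt ((heap.set pos newitem).getD i d0)
        ((heap.set pos newitem).getD ((i - 1) / 2) d0) = false) ∧
  (0 < pos → ∀ c, c < heap.length → (c = 2 * pos + 1 ∨ c = 2 * pos + 2) →
      pyLt ((heap.set pos newitem).getD c d0)
        ((heap.set pos newitem).getD ((pos - 1) / 2) d0) = false)

theorem getD_set2 {l : List (Int × Int)} {a b x : Nat} (hab : a ≠ b) (ha : a < l.length)
    (hb : b < l.length) (u v : Int × Int) :
    ((l.set a u).set b v).getD x d0 =
      if x = b then v else if x = a then u else l.getD x d0 := by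
  by_cases h1 : x = b
  · subst h1; rw [getD_set_self (by simpa using hb)]; simp
  · rw [getD_set_ne (fun hh => h1 hh.symm)]
    by_cases h2 : x = a
    · subst h2; rw [getD_set_self ha]; simp [h1]
    · rw [getD_set_ne (fun hh => h2 hh.symm)]; simp [h1, h2]

theorem getD_set1 {l : List (Int × Int)} {a x : Nat} (ha : a < l.length) (u : Int × Int) :
    (l.set a u).getD x d0 = if x = a then u else l.getD x d0 := by
  by_cases h1 : x = a
  · subst h1; rw [getD_set_self ha]; simp
  · rw [getD_set_ne (fun hh => h1 hh.symm)]; simp [h1]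

theorem siftdownGo_spec (newitem : Int × Int) : ∀ (fuel : Nat) (heap : List (Int × Int))
    (pos : Nat), pos ≤ fuel → pos < heap.length → heapExceptUp heap pos newitem →
    (siftdownGo 0 newitem fuel heap pos).Perm (heap.set pos newitem) ∧
      IsHeap (siftdownGo 0 newitem fuel heap pos) := by
  intro fuel
  induction fuel with
  | zero =>
    intro heap pos hfuel hpos hq
    obtain ⟨hq1, hq2⟩ := hq
    have hp0 : pos = 0 := by omega
    subst hp0
    rw [siftdownGo]
    refine ⟨List.Perm.refl _, ?_⟩
    intro i h0 hi
    rw [List.length_set] at hi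
    exact hq1 i h0 hi (by omega)
  | succ fuel ihf =>
    intro heap pos hfuel hpos hq
    obtain ⟨hq1, hq2⟩ := hq
    simp only [siftdownGo]
    by_cases h : 0 < pos
    · rw [if_pos h]
      by_cases hlt : pyLt newitem (heap.getD ((pos - 1) / 2) d0) = true
      · rw [if_pos hlt]
        have ih := ihf (heap.set pos (heap.getD ((pos - 1) / 2) d0)) ((pos - 1) / 2)
          (by omega)
        have hpplt : (pos - 1) / 2 < pos := by omega
        have hppose : (pos - 1) / 2 ≠ pos := by omega
        have hpplen : (pos - 1) / 2 < heap.length := by omega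
        have hA : ∀ x, (heap.set pos newitem).getD x d0 =
            if x = pos then newitem else heap.getD x d0 := fun x => getD_set1 hpos newitem
        have hA' : ∀ x, ((heap.set pos (heap.getD ((pos - 1) / 2) d0)).set ((pos - 1) / 2)
              newitem).getD x d0 =
            if x = (pos - 1) / 2 then newitem
            else if x = pos then heap.getD ((pos - 1) / 2) d0 else heap.getD x d0 :=
          fun x => getD_set2 (by omega) hpos hpplen _ newitem
        have hnext : heapExceptUp (heap.set pos (heap.getD ((pos - 1) / 2) d0))
            ((pos - 1) / 2) newitem := by
          constructor
          · intro i h0 hi hipp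
            rw [List.length_set] at hi
            rw [hA' i, hA' ((i - 1) / 2)]
            have hpar_lt : (i - 1) / 2 < i := by omega
            by_cases hip : i = pos
            · subst hip
              simp only [if_neg hipp, if_pos rfl]
              exact pyLt_asymm hlt
            · by_cases hpp1 : (i - 1) / 2 = (pos - 1) / 2
              · simp only [if_neg hipp, if_neg hip, hpp1, if_pos rfl]
                have h1 := hq1 i h0 hi hip
                rw [hA i, hA ((i - 1) / 2)] at h1
                rw [if_neg hip, hpp1, if_neg hppose] at h1
                exact pyLt_ff_tt h1 hlt
              · by_cases hpp2 : (i - 1) / 2 = pos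
                · rw [if_neg hipp, if_neg hip, if_neg hpp1, if_pos hpp2]
                  have hchild : i = 2 * pos + 1 ∨ i = 2 * pos + 2 := by omega
                  have h2 := hq2 (by omega) i hi hchild
                  rw [hA i, hA ((pos - 1) / 2)] at h2
                  rw [if_neg hip, if_neg hppose] at h2
                  exact h2
                · simp only [if_neg hipp, if_neg hip, if_neg hpp1, if_neg hpp2]
                  have h1 := hq1 i h0 hi hip
                  rw [hA i, hA ((i - 1) / 2)] at h1
                  rw [if_neg hip, if_neg hpp2] at h1
                  exact h1
          · intro hpp0 c hc hchild
            rw [List.length_set] at hc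
            rw [hA' c, hA' (((pos - 1) / 2 - 1) / 2)]
            have hppp_lt : ((pos - 1) / 2 - 1) / 2 < (pos - 1) / 2 := by omega
            have hppp_ne_pos : ((pos - 1) / 2 - 1) / 2 ≠ pos := by omega
            have hppp_ne_pp : ((pos - 1) / 2 - 1) / 2 ≠ (pos - 1) / 2 := by omega
            have hc_ne_pp : c ≠ (pos - 1) / 2 := by omega
            rw [if_neg hppp_ne_pp, if_neg hppp_ne_pos, if_neg hc_ne_pp]
            have hedge_pp : pyLt (heap.getD ((pos - 1) / 2) d0)
                (heap.getD (((pos - 1) / 2 - 1) / 2) d0) = false := by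
              have h1 := hq1 ((pos - 1) / 2) hpp0 hpplen hppose
              rw [hA, hA] at h1
              rw [if_neg hppose, if_neg hppp_ne_pos] at h1
              exact h1
            by_cases hcp : c = pos
            · subst hcp; rw [if_pos rfl]; exact hedge_pp
            · rw [if_neg hcp]
              have hcpar : (c - 1) / 2 = (pos - 1) / 2 := by omega
              have h1 := hq1 c (by omega) hc hcp
              rw [hA, hA] at h1
              rw [if_neg hcp, hcpar, if_neg hppose] at h1
              exact pyLt_ff_trans h1 hedge_pp
        have hlen2 : (pos - 1) / 2 < (heap.set pos (heap.getD ((pos - 1) / 2) d0)).length := by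
          simpa using hpplen
        obtain ⟨hperm, hheap⟩ := ih hlen2 hnext
        refine ⟨hperm.trans ?_, hheap⟩
        exact perm_set_swap heap pos ((pos - 1) / 2) (fun hh => hppose hh.symm) hpos hpplen
          newitem d0
      · rw [if_neg hlt]
        refine ⟨List.Perm.refl _, ?_⟩
        intro i h0 hi
        rw [List.length_set] at hi
        by_cases hip : i = pos
        · subst hip
          rw [getD_set1 hpos, getD_set1 hpos, if_pos rfl,
            if_neg (show (i - 1) / 2 ≠ i by omega)]
          simp only [Bool.not_eq_true] at hlt
          exact hlt
        · exact hq1 i h0 hi hip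
    · rw [if_neg h]
      refine ⟨List.Perm.refl _, ?_⟩
      intro i h0 hi
      rw [List.length_set] at hi
      exact hq1 i h0 hi (by omega)

theorem siftdownLoop_spec (newitem : Int × Int) : ∀ (heap : List (Int × Int)) (pos : Nat),
    pos < heap.length → heapExceptUp heap pos newitem →
    (siftdownLoop heap 0 pos newitem).Perm (heap.set pos newitem) ∧
      IsHeap (siftdownLoop heap 0 pos newitem) := fun heap pos hpos hq =>
  siftdownGo_spec newitem pos heap pos (Nat.le_refl pos) hpos hq

-- heap-but-for-the-travelling-hole invariant of _siftup's descent phase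
def heapExceptDown (heap : List (Int × Int)) (pos : Nat) : Prop :=
  (∀ i, 0 < i → i < heap.length → i ≠ pos → (i - 1) / 2 ≠ pos →
      pyLt (heap.getD i d0) (heap.getD ((i - 1) / 2) d0) = false) ∧
  (0 < pos → ∀ c, c < heap.length → (c = 2 * pos + 1 ∨ c = 2 * pos + 2) →
      pyLt (heap.getD c d0) (heap.getD ((pos - 1) / 2) d0) = false)

theorem siftup_step {heap : List (Int × Int)} {pos cpv : Nat} (hpos : pos < heap.length)
    (hcp : cpv < heap.length) (hchild : cpv = 2 * pos + 1 ∨ cpv = 2 * pos + 2)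
    (hsib : ∀ s, s < heap.length → (s = 2 * pos + 1 ∨ s = 2 * pos + 2) → s ≠ cpv →
      pyLt (heap.getD s d0) (heap.getD cpv d0) = false)
    (hr : heapExceptDown heap pos) :
    heapExceptDown (heap.set pos (heap.getD cpv d0)) cpv := by
  obtain ⟨hr1, hr2⟩ := hr
  have hget : ∀ x, (heap.set pos (heap.getD cpv d0)).getD x d0 =
      if x = pos then heap.getD cpv d0 else heap.getD x d0 := fun x => getD_set1 hpos _
  constructor
  · intro i h0 hi hicp hpicp
    rw [List.length_set] at hi
    rw [hget i, hget ((i - 1) / 2)]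
    by_cases hip : i = pos
    · subst hip
      rw [if_pos rfl, if_neg (show (i - 1) / 2 ≠ i by omega)]
      exact hr2 h0 cpv hcp hchild
    · rw [if_neg hip]
      by_cases hpip : (i - 1) / 2 = pos
      · rw [if_pos hpip]
        exact hsib i hi (by omega) hicp
      · rw [if_neg hpip]
        exact hr1 i h0 hi hip hpip
  · intro hcp0 c hc hchild_c
    rw [List.length_set] at hc
    have hpcp : (cpv - 1) / 2 = pos := by omega
    rw [hget c, hget ((cpv - 1) / 2), hpcp, if_pos rfl,
      if_neg (show c ≠ pos by omega)]
    have hccp : (c - 1) / 2 = cpv := by omega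
    rw [← hccp]
    exact hr1 c (by omega) hc (by omega) (by omega)

theorem siftupLoop_spec (newitem : Int × Int) : ∀ (heap : List (Int × Int)) (pos : Nat),
    pos < heap.length → heapExceptDown heap pos →
    (siftupLoop heap pos newitem).Perm (heap.set pos newitem) ∧
      IsHeap (siftupLoop heap pos newitem) := by
  intro heap pos
  induction heap, pos using siftupLoop.induct with
  | case1 heap pos ep cpos h rp cp ih =>
    intro hpos hr
    rw [siftupLoop]
    simp only [ep, cpos, rp, cp] at h ih ⊢
    rw [dif_pos h]
    by_cases hC : (decide (2 * pos + 1 + 1 < heap.length) &&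
        !pyLt (heap.getD (2 * pos + 1) d0) (heap.getD (2 * pos + 1 + 1) d0)) = true
    · rw [dif_pos hC] at ih
      rw [if_pos hC]
      simp only [Bool.and_eq_true, decide_eq_true_eq, Bool.not_eq_eq_eq_not, Bool.not_true] at hC
      obtain ⟨hrlt, hC2⟩ := hC
      have hnext := siftup_step hpos hrlt (Or.inr (by omega))
        (fun s hs hsc hsne => by
          have : s = 2 * pos + 1 := by omega
          subst this; exact hC2) hr
      obtain ⟨hperm, hheap⟩ := ih (by simpa using hrlt) hnext
      refine ⟨hperm.trans ?_, hheap⟩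
      exact perm_set_swap heap pos (2 * pos + 1 + 1) (by omega) hpos hrlt newitem d0
    · rw [dif_neg hC] at ih
      rw [if_neg hC]
      have hsib : ∀ s, s < heap.length → (s = 2 * pos + 1 ∨ s = 2 * pos + 2) →
          s ≠ 2 * pos + 1 → pyLt (heap.getD s d0) (heap.getD (2 * pos + 1) d0) = false := by
        intro s hs hsc hsne
        have hs2 : s = 2 * pos + 2 := by omega
        subst hs2
        simp only [Bool.and_eq_true, decide_eq_true_eq, Bool.not_eq_eq_eq_not, Bool.not_true,
          not_and] at hC
        have := hC (by omega)
        have ht : pyLt (heap.getD (2 * pos + 1) d0) (heap.getD (2 * pos + 1 + 1) d0) = true := by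
          revert this
          cases hx : pyLt (heap.getD (2 * pos + 1) d0) (heap.getD (2 * pos + 1 + 1) d0) <;> simp
        have := pyLt_asymm ht
        simpa using this
      have hnext := siftup_step hpos h (Or.inl rfl) hsib hr
      obtain ⟨hperm, hheap⟩ := ih (by simpa using h) hnext
      refine ⟨hperm.trans ?_, hheap⟩
      exact perm_set_swap heap pos (2 * pos + 1) (by omega) hpos h newitem d0
  | case2 heap pos ep cpos h =>
    intro hpos hr
    obtain ⟨hr1, hr2⟩ := hr
    rw [siftupLoop]
    simp only [ep, cpos] at h ⊢
    rw [dif_neg h]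
    have hq : heapExceptUp (heap.set pos newitem) pos newitem := by
      constructor
      · intro i h0 hi hip
        rw [List.length_set] at hi
        rw [List.set_set, getD_set1 hpos, getD_set1 hpos, if_neg hip]
        by_cases hpip : (i - 1) / 2 = pos
        · exfalso; omega
        · rw [if_neg hpip]
          exact hr1 i h0 hi hip hpip
      · intro hpos0 c hc hchild
        rw [List.length_set] at hc
        exfalso; omega
    have := siftdownLoop_spec newitem (heap.set pos newitem) pos (by simpa using hpos) hq
    rwa [List.set_set] at this

theorem getD_append_left {α : Type} (l t : List α) (j : Nat) (hj : j < l.length) (d : α) :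
    (l ++ t).getD j d = l.getD j d := by
  simp [List.getD, List.getElem?_append_left hj]

theorem heappush_spec {l : List (Int × Int)} (hl : IsHeap l) (x : Int × Int) :
    (heappush l x).Perm (l ++ [x]) ∧ IsHeap (heappush l x) := by
  unfold heappush
  have hset : (l ++ [x]).set l.length x = l ++ [x] := by
    rw [List.set_append]
    simp
  have hq : heapExceptUp (l ++ [x]) l.length x := by
    constructor
    · intro i h0 hi hip
      rw [hset]
      rw [List.length_append, List.length_cons, List.length_nil] at hi
      have hil : i < l.length := by omega
      rw [getD_append_left l [x] i hil, getD_append_left l [x] ((i - 1) / 2) (by omega)]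
      exact hl i h0 hil
    · intro h0 c hc hchild
      rw [List.length_append] at hc
      simp at hc
      omega
  have := siftdownLoop_spec x (l ++ [x]) l.length (by simp) hq
  rwa [hset] at this

theorem getD_dropLast {α : Type} (l : List α) (i : Nat) (hi : i < l.dropLast.length) (d : α) :
    l.dropLast.getD i d = l.getD i d := by
  have hi' : i < l.length := by simp at hi; omega
  rw [List.getD, List.getD, List.getElem?_eq_getElem hi, List.getElem?_eq_getElem hi',
    List.getElem_dropLast]

theorem heappop_spec {l : List (Int × Int)} (hl : IsHeap l) (hne : l ≠ []) :
    ∃ q', heappop l = some (l.getD 0 d0, q') ∧ IsHeap q' ∧ (l.getD 0 d0 :: q').Perm l := by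
  by_cases hsing : l.dropLast = []
  · rcases l with _ | ⟨a, t⟩
    · exact absurd rfl hne
    · rcases t with _ | ⟨b, t⟩
      · refine ⟨[], by simp [heappop, List.getD], ?_, by simp [List.getD]⟩
        intro i h0 hi; simp at hi
      · simp at hsing
  · have hrlen : 0 < l.dropLast.length := List.length_pos_iff.mpr hsing
    have hllen : l.dropLast.length + 1 = l.length := by
      simp [List.length_dropLast, Nat.sub_add_cancel (List.length_pos_iff.mpr hne)]
    have hget0 : l.dropLast.getD 0 d0 = l.getD 0 d0 := getD_dropLast l 0 hrlen d0
    have hr : heapExceptDown (l.dropLast.set 0 (l.getLast hne)) 0 := by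
      constructor
      · intro i h0 hi hip hpip
        rw [List.length_set] at hi
        rw [getD_set_ne (fun hh => hip hh.symm), getD_set_ne (fun hh => hpip hh.symm)]
        rw [getD_dropLast l i hi, getD_dropLast l ((i - 1) / 2) (by omega)]
        exact hl i h0 (by omega)
      · intro h0; exact absurd h0 (by omega)
    have := siftupLoop_spec (l.getLast hne) (l.dropLast.set 0 (l.getLast hne)) 0
      (by simpa using hrlen) hr
    rw [List.set_set] at this
    obtain ⟨hperm, hheap⟩ := this
    refine ⟨_, ?_, hheap, ?_⟩
    · unfold heappop
      rw [List.getLast?_eq_getLast hne]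
      have he' : l.dropLast.isEmpty = false := by simp [hsing]
      rw [← hget0]
      simp [he']
    · refine (List.Perm.cons _ hperm).trans ?_
      rw [← hget0]
      refine (cons_set_perm l.dropLast 0 hrlen (l.getLast hne) d0).trans ?_
      have h4 : (l.getLast hne :: l.dropLast).Perm (l.dropLast ++ [l.getLast hne]) :=
        (List.perm_append_singleton _ _).symm
      rw [List.dropLast_append_getLast hne] at h4
      exact h4

-- ---- building the heap by repeated pushes ----

theorem foldl_heappush_spec : ∀ (xs : List (Int × Int)) (acc : List (Int × Int)), IsHeap acc →
    IsHeap (xs.foldl heappush acc) ∧ (xs.foldl heappush acc).Perm (acc ++ xs) := by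
  intro xs
  induction xs with
  | nil => intro acc hacc; exact ⟨hacc, by simp⟩
  | cons x xs ih =>
    intro acc hacc
    obtain ⟨hperm, hheap⟩ := heappush_spec hacc x
    obtain ⟨ih1, ih2⟩ := ih (heappush acc x) hheap
    refine ⟨ih1, ih2.trans ?_⟩
    have := hperm.append_right xs
    rw [List.append_assoc] at this
    simpa using this

-- ---- the (size, index) item list A builds, in B's enumerate form ----

theorem items_eq (foods : List Int) :
    (PySem.List.pyRange 0 (foods.length : Int) 1).map
        (fun i => ((PySem.List.pyGetD foods i 0 : Int), i + 1)) =
      (PySem.List.enumerate foods).map (fun p => (p.2, p.1 + 1)) := by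
  apply List.ext_getElem
  · simp [PySem.List.pyRange_zero_natCast, PySem.List.length_enumerate]
  · intro i h1 h2
    have hi : i < foods.length := by
      simpa [PySem.List.pyRange_zero_natCast] using h1
    simp only [PySem.List.pyRange_zero_natCast, List.getElem_map, List.getElem_range]
    rw [PySem.List.getElem_enumerate]
    simp [PySem.List.pyGetD_natCast, List.getD, List.getElem?_eq_getElem hi]

-- ---- the reference mid-form: A's loop against the stably size-sorted item list ----

-- S is the item list sorted by size (stable); A's heap pops exactly walk S left to right.
def sortedItems (foods : List Int) : List (Int × Int) :=
  PySem.List.sorted ((PySem.List.enumerate foods).map (fun p => (p.2, p.1 + 1)))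
    (fun p => p.1) false

-- abstract form of A's loop: a cursor walking S (proof device, used by both directions)
def altGo (S : List (Int × Int)) (n : Nat) (k : Int) (cur : Nat) (time prev : Int) :
    Nat × Int :=
  if h : cur < n then
    let size := (S.getD cur d0).1
    let step := (size - prev) * ((n : Int) - (cur : Int))
    if time + step > k then (cur, time)
    else altGo S n k (cur + 1) (time + step) size
  else (cur, time)
termination_by n - cur

-- what A computes after its loop, as a function of the loop's (cur, time) result
def bFinish (S : List (Int × Int)) (n cur : Nat) (t k : Int) : Int :=
  match PySem.Int.mod? (k - t) ((n : Int) - (cur : Int)) with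
  | none => 0
  | some r =>
    match PySem.List.pyGet? (PySem.List.sorted (S.drop cur) (fun p => p.2) false) r with
    | none => 0
    | some x => x.2

theorem sorted_snd_eq {S : List (Int × Int)} (hnd : (S.map (fun p => p.2)).Nodup)
    (cur : Nat) {q : List (Int × Int)} (hperm : q.Perm (S.drop cur)) :
    PySem.List.sorted q (fun x => x.2) false =
      PySem.List.sorted (S.drop cur) (fun p => p.2) false := by
  apply PySem.List.sorted_eq_of_perm_of_pairwise_lt
  · exact (PySem.List.sorted_perm _ _ _).trans hperm.symm
  · have hT := PySem.List.sorted_pairwise (S.drop cur) (fun p => p.2)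
    have hTnd : ((PySem.List.sorted (S.drop cur) (fun p => p.2) false).map
        (fun p => p.2)).Nodup := by
      have h1 : ((S.drop cur).map (fun p => p.2)).Nodup :=
        ((List.drop_sublist cur S).map _).nodup hnd
      exact (((PySem.List.sorted_perm (S.drop cur) (fun p => p.2) false).map
        (fun p => p.2)).nodup_iff).mpr h1
    rw [List.Nodup, List.pairwise_map] at hTnd
    exact (hT.and hTnd).imp (by intro a b hab; exact lt_of_le_of_ne hab.1 hab.2)

-- B's stable sort by size yields a strictly pyLt-increasing list
theorem pyLt_fst_le {a b : Int × Int} (h : pyLt a b = true) : a.1 ≤ b.1 := by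
  obtain ⟨a1, a2⟩ := a; obtain ⟨b1, b2⟩ := b
  simp only [pyLt, Bool.or_eq_true, Bool.and_eq_true, decide_eq_true_eq, beq_iff_eq] at h
  omega

theorem pyLt_of_fst_lt {a b : Int × Int} (h : a.1 < b.1) : pyLt a b = true := by
  obtain ⟨a1, a2⟩ := a; obtain ⟨b1, b2⟩ := b
  simp only [pyLt, Bool.or_eq_true, Bool.and_eq_true, decide_eq_true_eq, beq_iff_eq]
  omega

theorem pyLt_of_le_snd {a b : Int × Int} (h1 : a.1 ≤ b.1) (h2 : a.2 < b.2) :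
    pyLt a b = true := by
  obtain ⟨a1, a2⟩ := a; obtain ⟨b1, b2⟩ := b
  simp only [pyLt, Bool.or_eq_true, Bool.and_eq_true, decide_eq_true_eq, beq_iff_eq]
  omega

theorem insertBy_pairwise_pyLt (x : Int × Int) : ∀ (acc : List (Int × Int)),
    acc.Pairwise (fun a b => pyLt a b = true) → (∀ y ∈ acc, y.2 < x.2) →
    (PySem.List.insertBy (fun a b => decide (a.1 < b.1)) x acc).Pairwise
      (fun a b => pyLt a b = true) := by
  intro acc
  induction acc with
  | nil => intro _ _; simp [PySem.List.insertBy]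
  | cons y ys ih =>
    intro hp hy
    rw [PySem.List.insertBy]
    by_cases hxy : x.1 < y.1
    · rw [if_pos (by simpa using hxy)]
      rw [List.pairwise_cons]
      refine ⟨?_, hp⟩
      intro z hz
      rcases List.mem_cons.mp hz with rfl | hz
      · exact pyLt_of_fst_lt hxy
      · have := (List.pairwise_cons.mp hp).1 z hz
        exact pyLt_of_fst_lt (lt_of_lt_of_le hxy (pyLt_fst_le this))
    · rw [if_neg (by simpa using hxy)]
      rw [List.pairwise_cons] at hp ⊢
      refine ⟨?_, ih hp.2 (fun z hz => hy z (List.mem_cons_of_mem y hz))⟩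
      intro z hz
      rw [PySem.List.mem_insertBy] at hz
      rcases hz with rfl | hz
      · exact pyLt_of_le_snd (by omega) (hy y List.mem_cons_self)
      · exact hp.1 z hz

theorem foldl_insertBy_pairwise_pyLt : ∀ (xs acc : List (Int × Int)),
    acc.Pairwise (fun a b => pyLt a b = true) →
    (∀ a ∈ acc, ∀ b ∈ xs, a.2 < b.2) →
    xs.Pairwise (fun a b => a.2 < b.2) →
    (xs.foldl (fun acc x => PySem.List.insertBy (fun a b => decide (a.1 < b.1)) x acc)
        acc).Pairwise (fun a b => pyLt a b = true) := by
  intro xs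
  induction xs with
  | nil => intro acc h _ _; simpa using h
  | cons x xs ih =>
    intro acc hacc hcross hxs
    rw [List.foldl_cons]
    rw [List.pairwise_cons] at hxs
    refine ih _ (insertBy_pairwise_pyLt x acc hacc
      (fun y hy => hcross y hy x List.mem_cons_self)) ?_ hxs.2
    intro a ha b hb
    rw [PySem.List.mem_insertBy] at ha
    rcases ha with rfl | ha
    · exact hxs.1 b hb
    · exact hcross a ha b (List.mem_cons_of_mem x hb)

theorem sorted_fst_pairwise_pyLt (xs : List (Int × Int))
    (h : xs.Pairwise (fun a b => a.2 < b.2)) :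
    (PySem.List.sorted xs (fun p => p.1) false).Pairwise (fun a b => pyLt a b = true) := by
  rw [PySem.List.sorted_eq_foldl_insertBy]
  exact foldl_insertBy_pairwise_pyLt xs [] (by simp) (by simp) h

theorem enumMap_snd_lt (foods : List Int) :
    ((PySem.List.enumerate foods).map (fun p => (p.2, p.1 + 1))).Pairwise
      (fun a b => a.2 < b.2) := by
  rw [List.pairwise_map]
  exact (PySem.List.pairwise_lt_enumerate foods 0).imp (by intro a b h; simpa using by omega)

-- ---- A's heap loop runs in lockstep with the cursor walk over sortedItems ----

theorem loop_eq (S : List (Int × Int)) (hS : S.Pairwise (fun a b => pyLt a b = true))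
    (hnd : (S.map (fun p => p.2)).Nodup) (k : Int) :
    ∀ (fuel : Nat) (q : List (Int × Int)) (cur : Nat) (time prev : Int),
      q.length = fuel → IsHeap q → q.Perm (S.drop cur) → cur ≤ S.length →
      solutionLoop q ((S.length : Int) - (cur : Int)) time prev k =
        bFinish S S.length (altGo S S.length k cur time prev).1
          (altGo S S.length k cur time prev).2 k := by
  intro fuel
  induction fuel using Nat.strong_induction_on with
  | _ fuel ih =>
    intro q cur time prev hlen hheap hperm hcur
    match q with
    | [] =>
      have hdrop : S.drop cur = [] := (hperm.symm).eq_nil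
      have hcureq : cur = S.length := by
        have := List.drop_eq_nil_iff.mp hdrop
        omega
      subst hcureq
      rw [altGo]
      rw [dif_neg (by omega : ¬ S.length < S.length)]
      simp [solutionLoop, solutionGo, bFinish, PySem.Int.mod?]
    | h0 :: rest =>
      have hcurlt : cur < S.length := by
        by_contra hc
        rw [List.drop_eq_nil_of_le (by omega)] at hperm
        exact (List.cons_ne_nil h0 rest) hperm.eq_nil
      have hdropeq : S.drop cur = S[cur] :: S.drop (cur + 1) :=
        List.drop_eq_getElem_cons hcurlt
      have hgd0 : (h0 :: rest).getD 0 d0 = h0 := by simp [List.getD]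
      have hh0 : h0 = S[cur] := by
        have hmem : S[cur] ∈ (h0 :: rest) := by
          rw [hperm.mem_iff, hdropeq]
          exact List.mem_cons_self
        have h1 : pyLt S[cur] h0 = false := by
          have := root_min_mem hheap hmem
          rwa [hgd0] at this
        have h2 : h0 ∈ S.drop cur := hperm.mem_iff.mp List.mem_cons_self
        rw [hdropeq] at h2
        rcases List.mem_cons.mp h2 with rfl | h2
        · rfl
        · exfalso
          have hpw : (S.drop cur).Pairwise (fun a b => pyLt a b = true) :=
            List.Pairwise.sublist (List.drop_sublist cur S) hS
          rw [hdropeq, List.pairwise_cons] at hpw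
          rw [hpw.1 h0 h2] at h1
          exact Bool.true_eq_false.mp h1
      have hSgd : (S.getD cur d0) = S[cur] := by
        simp [List.getD, List.getElem?_eq_getElem hcurlt]
      rw [altGo]
      rw [dif_pos hcurlt]
      have hfuel : rest.length + 1 = fuel := by simpa using hlen
      rw [solutionLoop]
      rw [show (h0 :: rest).length = rest.length + 1 from rfl]
      rw [solutionGo]
      by_cases hcond : time + (h0.1 - prev) * ((S.length : Int) - (cur : Int)) ≤ k
      · rw [if_pos hcond]
        rw [if_neg (by rw [hSgd, ← hh0]; exact not_lt.mpr hcond)]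
        obtain ⟨q', hpop, hq'heap, hq'perm⟩ := heappop_spec hheap (List.cons_ne_nil h0 rest)
        rw [hgd0] at hpop hq'perm
        have hq'perm2 : q'.Perm (S.drop (cur + 1)) := by
          have := hq'perm.trans hperm
          rw [hdropeq, ← hh0] at this
          exact this.cons_inv
        have hq'len : q'.length + 1 = (h0 :: rest).length := by
          have := hq'perm.length_eq
          simpa using this
        have harith : (S.length : Int) - (cur : Int) - 1 =
            (S.length : Int) - ((cur + 1 : Nat) : Int) := by push_cast; ring
        have hql : rest.length = q'.length := by omega
        have ihh := ih q'.length (by omega) q' (cur + 1)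
          (time + (h0.1 - prev) * ((S.length : Int) - (cur : Int))) h0.1 rfl hq'heap
          hq'perm2 (by omega)
        rw [solutionLoop] at ihh
        simp only [hpop]
        rw [harith, hql, hSgd, ← hh0]
        exact ihh
      · rw [if_neg hcond]
        rw [if_pos (by rw [hSgd, ← hh0]; exact lt_of_not_ge hcond)]
        rw [bFinish]
        rw [sorted_snd_eq hnd cur hperm]

-- A equals the cursor walk + bFinish (the mid-form the B side is compared against)
theorem solution_eq_mid (foods : List Int) (k : Int) (hsum : ¬ foods.sum ≤ k) :
    solution foods k =
      bFinish (sortedItems foods) (sortedItems foods).length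
        (altGo (sortedItems foods) (sortedItems foods).length k 0 0 0).1
        (altGo (sortedItems foods) (sortedItems foods).length k 0 0 0).2 k := by
  simp only [solution, if_neg hsum]
  have hfold : (PySem.List.pyRange 0 (foods.length : Int) 1).foldl
      (fun q i => heappush q (PySem.List.pyGetD foods i 0, i + 1)) [] =
      ((PySem.List.enumerate foods).map (fun p => (p.2, p.1 + 1))).foldl heappush [] := by
    rw [← items_eq foods, List.foldl_map]
  rw [hfold]
  obtain ⟨hqh, hqp⟩ := foldl_heappush_spec
    ((PySem.List.enumerate foods).map (fun p => (p.2, p.1 + 1))) []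
    (by intro i h0 hi; simp at hi)
  rw [List.nil_append] at hqp
  have hpwS := sorted_fst_pairwise_pyLt _ (enumMap_snd_lt foods)
  have hndS : ((sortedItems foods).map (fun p => p.2)).Nodup := by
    have h1 : (((PySem.List.enumerate foods).map (fun p => (p.2, p.1 + 1))).map
        (fun p => p.2)).Nodup := by
      have := List.pairwise_map.mpr (enumMap_snd_lt foods)
      exact List.Pairwise.imp (fun h => ne_of_lt h)
        (this : _root_.List.Pairwise (fun a b => a < b) _)
    have hperm2 := (PySem.List.sorted_perm
      ((PySem.List.enumerate foods).map (fun p => (p.2, p.1 + 1)))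
      (fun p : Int × Int => p.1) false).map (fun p : Int × Int => p.2)
    exact hperm2.nodup_iff.mpr h1
  have hSlen : (sortedItems foods).length = foods.length := by
    rw [sortedItems, PySem.List.length_sorted, List.length_map, PySem.List.length_enumerate]
  have hqperm : ((PySem.List.enumerate foods).map (fun p => (p.2, p.1 + 1))).foldl
      heappush [] |>.Perm ((sortedItems foods).drop 0) := by
    rw [List.drop_zero]
    exact hqp.trans (PySem.List.sorted_perm _ _ false).symm
  have hmain := loop_eq (sortedItems foods) hpwS hndS k _ _ 0 0 0 rfl hqh hqperm (by omega)
  have harg : ((sortedItems foods).length : Int) - ((0 : Nat) : Int) =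
      (foods.length : Int) := by
    rw [hSlen]; simp
  rw [harg] at hmain
  exact hmain

-- ---- B side: the eaten-level function and its level decomposition ----

theorem eaten_eq_sum (foods : List Int) (v : Int) :
    eatenAmt foods v = (foods.map (fun f => min f v)).sum := by
  unfold eatenAmt
  rw [PySem.List.foldl_add]
  simp

theorem eaten_sumS (foods : List Int) (v : Int) {S : List (Int × Int)}
    (hperm : S.Perm ((PySem.List.enumerate foods).map (fun p => (p.2, p.1 + 1)))) :
    eatenAmt foods v = (S.map (fun p => min p.1 v)).sum := by
  rw [eaten_eq_sum]
  rw [(hperm.map (fun p => min p.1 v)).sum_eq]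
  rw [List.map_map]
  have : foods.map (fun f => min f v) =
      ((PySem.List.enumerate foods).map (fun p => p.2)).map (fun f => min f v) := by
    rw [PySem.List.map_snd_enumerate]
  rw [this, List.map_map]
  rfl

theorem sum_min_mono (L : List (Int × Int)) {v w : Int} (h : v ≤ w) :
    (L.map (fun p => min p.1 v)).sum ≤ (L.map (fun p => min p.1 w)).sum := by
  apply List.sum_le_sum
  intro p _
  exact min_le_min (le_refl p.1) h

-- Σ min(size, v) over S, split at a cursor c all of whose left part is ≤ v and right ≥ v
theorem sum_min_split (S : List (Int × Int)) (v : Int) (c : Nat)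
    (h1 : ∀ p ∈ S.take c, p.1 ≤ v) (h2 : ∀ p ∈ S.drop c, v ≤ p.1) :
    (S.map (fun p => min p.1 v)).sum =
      ((S.take c).map (fun p => p.1)).sum + v * ((S.drop c).length : Int) := by
  conv_lhs => rw [← List.take_append_drop c S]
  rw [List.map_append, List.sum_append]
  congr 1
  · apply congrArg
    apply List.map_congr_left
    intro p hp
    exact min_eq_left (h1 p hp)
  · have : (S.drop c).map (fun p => min p.1 v) = (S.drop c).map (fun _ => v) := by
      apply List.map_congr_left
      intro p hp
      exact min_eq_right (h2 p hp)
    rw [this, PySem.List.sum_map_const_int]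
    ring

-- ---- the binary search finds the exact level ----

theorem bsGo_spec (foods : List Int) (k : Int) : ∀ (fuel : Nat) (lo hi : Int),
    eatenAmt foods lo ≤ k → k < eatenAmt foods hi → lo < hi → (hi - lo).toNat ≤ fuel →
    eatenAmt foods (bsGo foods k fuel lo hi) ≤ k ∧
      k < eatenAmt foods (bsGo foods k fuel lo hi + 1) := by
  intro fuel
  induction fuel with
  | zero => intro lo hi h1 h2 h3 h4; omega
  | succ fuel ih =>
    intro lo hi h1 h2 h3 h4
    rw [bsGo]
    by_cases hgt : 1 < hi - lo
    · rw [if_pos hgt]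
      have hmid : PySem.Int.floordiv (lo + hi) 2 = (lo + hi) / 2 :=
        PySem.Int.floordiv_eq_ediv_of_pos (by omega)
      by_cases hc : eatenAmt foods (PySem.Int.floordiv (lo + hi) 2) ≤ k
      · rw [if_pos hc]
        exact ih (PySem.Int.floordiv (lo + hi) 2) hi hc h2 (by rw [hmid]; omega)
          (by rw [hmid]; rw [hmid] at *; omega)
      · rw [if_neg hc]
        exact ih lo (PySem.Int.floordiv (lo + hi) 2) h1 (lt_of_not_ge hc)
          (by rw [hmid]; omega) (by rw [hmid]; omega)
    · rw [if_neg hgt]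
      have hhi : hi = lo + 1 := by omega
      exact ⟨h1, by rw [← hhi]; exact h2⟩

-- ---- the cursor walk breaks exactly at the binary-search level ----

theorem take_le_drop (S : List (Int × Int)) (hS : S.Pairwise (fun a b => a.1 ≤ b.1))
    (c : Nat) : ∀ p ∈ S.take c, ∀ q ∈ S.drop c, p.1 ≤ q.1 := by
  have hS' : (S.take c ++ S.drop c).Pairwise (fun a b => a.1 ≤ b.1) := by
    rw [List.take_append_drop]; exact hS
  exact (List.pairwise_append.mp hS').2.2

theorem drop_head_le (S : List (Int × Int)) (hS : S.Pairwise (fun a b => a.1 ≤ b.1))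
    {c : Nat} (hc : c < S.length) : ∀ q ∈ S.drop c, (S.getD c d0).1 ≤ q.1 := by
  have hdropeq : S.drop c = S[c] :: S.drop (c + 1) := List.drop_eq_getElem_cons hc
  have hgd : S.getD c d0 = S[c] := by simp [List.getD, List.getElem?_eq_getElem hc]
  have hpw : (S.drop c).Pairwise (fun a b => a.1 ≤ b.1) :=
    List.Pairwise.sublist (List.drop_sublist c S) hS
  rw [hdropeq, List.pairwise_cons] at hpw
  intro q hq
  rw [hdropeq] at hq
  rcases List.mem_cons.mp hq with rfl | hq
  · rw [hgd]
  · rw [hgd]; exact hpw.1 q hq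

theorem take_succ_sum (S : List (Int × Int)) {c : Nat} (hc : c < S.length) :
    ((S.take (c + 1)).map (fun p => p.1)).sum =
      ((S.take c).map (fun p => p.1)).sum + (S.getD c d0).1 := by
  have hgd : S.getD c d0 = S[c] := by simp [List.getD, List.getElem?_eq_getElem hc]
  rw [hgd, List.take_succ, List.getElem?_eq_getElem hc, Option.toList_some, List.map_append,
    List.sum_append, List.map_singleton, List.sum_singleton]

-- the walk ends at a cursor c < n with everything before ≤ v and everything after > v,
-- and a final time that differs from eaten(v) by a multiple of n - c
theorem altGo_spec (S : List (Int × Int)) (k v : Int)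
    (hS : S.Pairwise (fun a b => a.1 ≤ b.1))
    (hgv : (S.map (fun p => min p.1 v)).sum ≤ k)
    (hgv1 : k < (S.map (fun p => min p.1 (v + 1))).sum) :
    ∀ (m cur : Nat) (time prev : Int), S.length - cur = m → cur < S.length →
      time = ((S.take cur).map (fun p => p.1)).sum + prev * ((S.length : Int) - (cur : Int)) →
      (∀ p ∈ S.take cur, p.1 ≤ v) →
      ∃ (c : Nat) (p : Int),
        altGo S S.length k cur time prev =
          (c, ((S.take c).map (fun q => q.1)).sum + p * ((S.length : Int) - (c : Int))) ∧
        c < S.length ∧ (∀ q ∈ S.take c, q.1 ≤ v) ∧ (∀ q ∈ S.drop c, v < q.1) := by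
  intro m
  induction m using Nat.strong_induction_on with
  | _ m ih =>
    intro cur time prev hm hcur htime htake
    rw [altGo, dif_pos hcur]
    have hgd : ∀ q ∈ S.drop cur, (S.getD cur d0).1 ≤ q.1 := drop_head_le S hS hcur
    have hmemd : S.getD cur d0 ∈ S.drop cur := by
      have : S.drop cur = S[cur] :: S.drop (cur + 1) := List.drop_eq_getElem_cons hcur
      rw [this]
      have hgd' : S.getD cur d0 = S[cur] := by simp [List.getD, List.getElem?_eq_getElem hcur]
      rw [hgd']
      exact List.mem_cons_self
    have hE : time + ((S.getD cur d0).1 - prev) * ((S.length : Int) - (cur : Int)) =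
        (S.map (fun p => min p.1 (S.getD cur d0).1)).sum := by
      rw [sum_min_split S (S.getD cur d0).1 cur
        (fun p hp => take_le_drop S hS cur p hp _ hmemd) hgd]
      rw [htime]
      have hlen : ((S.drop cur).length : Int) = (S.length : Int) - (cur : Int) := by
        rw [List.length_drop]; omega
      rw [hlen]
      ring
    by_cases hcond : time + ((S.getD cur d0).1 - prev) * ((S.length : Int) - (cur : Int)) > k
    · rw [if_pos hcond]
      refine ⟨cur, prev, by rw [htime], hcur, htake, ?_⟩
      have hszv : v < (S.getD cur d0).1 := by
        by_contra hle
        push_neg at hle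
        have := sum_min_mono S hle
        omega
      intro q hq
      exact lt_of_lt_of_le hszv (hgd q hq)
    · rw [if_neg hcond]
      push_neg at hcond
      have hszv : (S.getD cur d0).1 ≤ v := by
        by_contra hlt
        push_neg at hlt
        have hv1 : v + 1 ≤ (S.getD cur d0).1 := by omega
        have := sum_min_mono S hv1
        omega
      have htake' : ∀ p ∈ S.take (cur + 1), p.1 ≤ v := by
        intro p hp
        rw [List.take_succ, List.getElem?_eq_getElem hcur] at hp
        rcases List.mem_append.mp hp with hp | hp
        · exact htake p hp
        · have hgd' : S.getD cur d0 = S[cur] := by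
            simp [List.getD, List.getElem?_eq_getElem hcur]
          simp at hp
          rw [hp, ← hgd']
          exact hszv
      have hcur1 : cur + 1 < S.length := by
        by_contra hge
        push_neg at hge
        have htakeall : S.take (cur + 1) = S := List.take_of_length_le (by omega)
        have hall : ∀ p ∈ S, p.1 ≤ v := by
          intro p hp
          apply htake'
          rw [htakeall]
          exact hp
        have h1 : (S.map (fun p => min p.1 (v + 1))).sum =
            (S.map (fun p => min p.1 v)).sum := by
          apply congrArg
          apply List.map_congr_left
          intro p hp
          rw [min_eq_left (by have := hall p hp; omega : p.1 ≤ v + 1),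
            min_eq_left (hall p hp)]
        omega
      have htime' : time + ((S.getD cur d0).1 - prev) * ((S.length : Int) - (cur : Int)) =
          ((S.take (cur + 1)).map (fun p => p.1)).sum +
            (S.getD cur d0).1 * ((S.length : Int) - ((cur + 1 : Nat) : Int)) := by
        rw [take_succ_sum S hcur, hE,
          sum_min_split S (S.getD cur d0).1 cur
            (fun p hp => take_le_drop S hS cur p hp _ hmemd) hgd]
        have hlen : ((S.drop cur).length : Int) = (S.length : Int) - (cur : Int) := by
          rw [List.length_drop]; omega
        rw [hlen]
        push_cast
        ring
      exact ih (S.length - (cur + 1)) (by omega) (cur + 1) _ (S.getD cur d0).1 rfl hcur1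
        htime' htake'

-- ---- PySem mod under a shifted numerator ----

theorem mod?_sub_mul {a x m : Int} (hm : 0 < m) :
    PySem.Int.mod? (a - x * m) m = PySem.Int.mod? a m := by
  unfold PySem.Int.mod?
  rw [if_neg (by omega), if_neg (by omega)]
  congr 1
  show PySem.Int.mod (a - x * m) m = PySem.Int.mod a m
  rw [PySem.Int.mod_eq_emod_of_pos hm, PySem.Int.mod_eq_emod_of_pos hm]
  conv_lhs => rw [sub_eq_add_neg, ← neg_mul]
  exact Int.add_mul_emod_self_right a (-x) m

-- ---- final assembly ----

theorem solution_agree (foods : List Int) (k : Int) (hpre : Pre_solution foods k) :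
    solution foods k = solution_alt foods k := by
  by_cases hsum : foods.sum ≤ k
  · simp [solution, solution_alt, hsum]
  · have hne : foods ≠ [] := by
      rintro rfl
      have h0 := hpre rfl
      simp at hsum
      omega
    obtain ⟨mn, hmn⟩ : ∃ mn, PySem.List.min? foods (fun x => x) = some mn := by
      cases h : PySem.List.min? foods (fun x => x) with
      | none => exact absurd ((PySem.List.min?_eq_none_iff foods (fun x => x)).mp h) hne
      | some mn => exact ⟨mn, rfl⟩
    obtain ⟨mx, hmx⟩ : ∃ mx, PySem.List.max? foods (fun x => x) = some mx := by
      cases h : PySem.List.max? foods (fun x => x) with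
      | none => exact absurd ((PySem.List.max?_eq_none_iff foods (fun x => x)).mp h) hne
      | some mx => exact ⟨mx, rfl⟩
    have hmnmin : ∀ y ∈ foods, mn ≤ y := PySem.List.min?_isMin hmn
    have hmxmax : ∀ y ∈ foods, y ≤ mx := PySem.List.max?_isMax hmx
    have hnpos : 0 < foods.length := List.length_pos_iff.mpr hne
    -- the level bracket for the binary search
    set lo := min (min mn k) 0 with hlo_def
    have hlo_le : lo ≤ mn ∧ lo ≤ k ∧ lo ≤ 0 :=
      ⟨le_trans (min_le_left _ _) (min_le_left _ _),
       le_trans (min_le_left _ _) (min_le_right _ _), min_le_right _ _⟩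
    have hglo : eatenAmt foods lo ≤ k := by
      have hconst : eatenAmt foods lo = (foods.length : Int) * lo := by
        rw [eaten_eq_sum]
        have : foods.map (fun f => min f lo) = foods.map (fun _ => lo) := by
          apply List.map_congr_left
          intro f hf
          exact min_eq_right (le_trans hlo_le.1 (hmnmin f hf))
        rw [this, PySem.List.sum_map_const_int]
      rw [hconst]
      nlinarith [hlo_le.2.1, hlo_le.2.2, show (1 : Int) ≤ (foods.length : Int) by
        exact_mod_cast hnpos]
    have hghi : eatenAmt foods mx = foods.sum := by
      rw [eaten_eq_sum]
      have : foods.map (fun f => min f mx) = foods.map (fun f => f) := by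
        apply List.map_congr_left
        intro f hf
        exact min_eq_left (hmxmax f hf)
      rw [this, List.map_id']
    have hlohi : lo < mx := by
      have hmnmem := PySem.List.min?_mem hmn
      have h1 : lo ≤ mx := le_trans hlo_le.1 (hmxmax mn hmnmem)
      rcases lt_or_eq_of_le h1 with h | h
      · exact h
      · exfalso; rw [h, hghi] at hglo; exact hsum hglo
    set v := bsGo foods k (mx - lo).toNat lo mx with hv_def
    obtain ⟨hP1, hP2⟩ := bsGo_spec foods k (mx - lo).toNat lo mx hglo
      (by rw [hghi]; omega) hlohi (le_refl _)
    -- set up S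
    set S := sortedItems foods with hS_def
    have hSperm : S.Perm ((PySem.List.enumerate foods).map (fun p => (p.2, p.1 + 1))) :=
      PySem.List.sorted_perm _ _ false
    have hSlen : S.length = foods.length := by
      rw [hS_def, sortedItems, PySem.List.length_sorted, List.length_map,
        PySem.List.length_enumerate]
    have hSsorted : S.Pairwise (fun a b => a.1 ≤ b.1) :=
      PySem.List.sorted_pairwise _ _
    have hgvS : (S.map (fun p => min p.1 v)).sum ≤ k := by
      rw [← eaten_sumS foods v hSperm]; exact hP1
    have hgv1S : k < (S.map (fun p => min p.1 (v + 1))).sum := by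
      rw [← eaten_sumS foods (v + 1) hSperm]; exact hP2
    -- run the cursor walk
    obtain ⟨c, p, haltgo, hcn, htakev, hdropv⟩ := altGo_spec S k v hSsorted hgvS hgv1S
      (S.length - 0) 0 0 0 rfl (by omega) (by simp) (by simp)
    -- A's value
    rw [solution_eq_mid foods k hsum, ← hS_def, haltgo]
    -- B's value
    simp only [solution_alt, if_neg hsum]
    simp only [hmn, hmx]
    rw [← hlo_def, ← hv_def]
    -- the remaining list is the index projection of the index-sorted tail of S
    have hRsorted : PySem.List.sorted (S.drop c) (fun q => q.2) false =
        ((PySem.List.enumerate foods).map (fun q => (q.2, q.1 + 1))).filter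
          (fun q => decide (v < q.1)) := by
      apply PySem.List.sorted_eq_of_perm_of_pairwise_lt
      · have hfilterS : S.filter (fun q => decide (v < q.1)) = S.drop c := by
          conv_lhs => rw [← List.take_append_drop c S]
          rw [List.filter_append]
          have h1 : (S.take c).filter (fun q => decide (v < q.1)) = [] := by
            rw [List.filter_eq_nil_iff]
            intro q hq
            simp only [decide_eq_true_eq, not_lt]
            exact htakev q hq
          have h2 : (S.drop c).filter (fun q => decide (v < q.1)) = S.drop c := by
            rw [List.filter_eq_self]
            intro q hq
            simp only [decide_eq_true_eq]
            exact hdropv q hq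
          rw [h1, h2, List.nil_append]
        rw [← hfilterS]
        exact (hSperm.filter _).symm
      · exact List.Pairwise.filter _ (enumMap_snd_lt foods)
    have hRmap : ((PySem.List.enumerate foods).filter (fun q => decide (v < q.2))).map
          (fun q => q.1 + 1) =
        (PySem.List.sorted (S.drop c) (fun q => q.2) false).map (fun q => q.2) := by
      rw [hRsorted, List.filter_map, List.map_map]
      rfl
    have hRlen : (((PySem.List.enumerate foods).filter (fun q => decide (v < q.2))).map
          (fun q => q.1 + 1)).length = S.length - c := by
      rw [hRmap, List.length_map, PySem.List.length_sorted, List.length_drop]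
    -- the two mod computations agree
    have hmpos : (0 : Int) < (S.length : Int) - (c : Int) := by
      have : c < S.length := hcn
      omega
    have hgveq : eatenAmt foods v =
        ((S.take c).map (fun q => q.1)).sum + v * ((S.length : Int) - (c : Int)) := by
      rw [eaten_sumS foods v hSperm]
      rw [sum_min_split S v c htakev (fun q hq => le_of_lt (hdropv q hq))]
      have hlen : ((S.drop c).length : Int) = (S.length : Int) - (c : Int) := by
        rw [List.length_drop]
        have : c < S.length := hcn
        omega
      rw [hlen]
    have hdivcast : ((((PySem.List.enumerate foods).filter
          (fun q => decide (v < q.2))).map (fun q => q.1 + 1)).length : Int) =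
        (S.length : Int) - (c : Int) := by
      rw [hRlen]
      have : c < S.length := hcn
      omega
    have hmodeq : PySem.Int.mod?
          (k - eatenAmt foods v)
          ((((PySem.List.enumerate foods).filter (fun q => decide (v < q.2))).map
            (fun q => q.1 + 1)).length : Int) =
        PySem.Int.mod?
          (k - (((S.take c).map (fun q => q.1)).sum + p * ((S.length : Int) - (c : Int))))
          ((S.length : Int) - (c : Int)) := by
      rw [hdivcast, hgveq]
      have h1 : k - (((S.take c).map (fun q => q.1)).sum + v * ((S.length : Int) - (c : Int)))
          = (k - (((S.take c).map (fun q => q.1)).sum +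
              p * ((S.length : Int) - (c : Int)))) -
            (v - p) * ((S.length : Int) - (c : Int)) := by ring
      rw [h1]
      exact mod?_sub_mul hmpos
    rw [bFinish, ← hmodeq]
    cases hmr : PySem.Int.mod? (k - eatenAmt foods v)
        ((((PySem.List.enumerate foods).filter (fun q => decide (v < q.2))).map
          (fun q => q.1 + 1)).length : Int) with
    | none => rfl
    | some r =>
      have hr : r = (k - eatenAmt foods v).fmod ((S.length : Int) - (c : Int)) := by
        rw [hdivcast] at hmr
        unfold PySem.Int.mod? at hmr
        rw [if_neg (by omega)] at hmr
        exact (Option.some.inj hmr).symm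
      have hr0 : 0 ≤ r := by
        rw [hr]
        exact PySem.Int.mod_nonneg _ hmpos
      have hrt : r = ((r.toNat : Nat) : Int) := by omega
      rw [hRmap, hrt]
      simp only [PySem.List.pyGet?_natCast, List.getElem?_map]
      cases (PySem.List.sorted (S.drop c) (fun q => q.2) false)[r.toNat]? <;> rfl

-- ===== VERDICT (by name: the statement is the Claim_ definition above) =====
theorem solution_spec : Claim_equal_solution := by
  intro foods k _ hpre
  unfold Spec_solution
  exact solution_agree foods k hpre
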